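-- pv_equiv track=rewrite | github.com/Leavaway/Practice | histogram.py | count_in_bin
-- ===== SOURCE A (Python) =====
-- def count_in_bin(values, lower, upper):
--     '''
--     @param value is a seq contains datas
--     @return a seq that count by bins interval
--     '''
--     seq = [0,0,0]
--     for i in values:
--         if i <= lower:
--             seq[0] += 1
--         elif i > lower and i <= upper:
--             seq[1] += 1
--         else:
--             seq[2] += 1
--     return seq
-- ===== SOURCE B (Python) =====
-- def count_in_bin(values, lower, upper):
--     '''
--     @param value is a seq contains datas
--     @return a seq that count by bins interval
--     '''
--     s = sorted(values)
--     n = len(s)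
--
--     def bisect_right(x, lo):
--         # first index >= lo whose element is > x (binary search on sorted s)
--         hi = n
--         while lo < hi:
--             mid = (lo + hi) // 2
--             if x < s[mid]:
--                 hi = mid
--             else:
--                 lo = mid + 1
--         return lo
--
--     c0 = bisect_right(lower, 0)
--     c1 = bisect_right(upper, c0) - c0
--     return [c0, c1, n - c0 - c1]
-- ===== Notes on version B (the rewrite author's own statement) =====
-- stated objective: alternative
-- what changed: Replaces the per-element three-way branch count with sort-then-binary-search: sort the values once, find the two bin boundaries by binary search (a hand-written bisect_right), and read the three counts off the boundary positions by subtraction.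
import Mathlib
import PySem

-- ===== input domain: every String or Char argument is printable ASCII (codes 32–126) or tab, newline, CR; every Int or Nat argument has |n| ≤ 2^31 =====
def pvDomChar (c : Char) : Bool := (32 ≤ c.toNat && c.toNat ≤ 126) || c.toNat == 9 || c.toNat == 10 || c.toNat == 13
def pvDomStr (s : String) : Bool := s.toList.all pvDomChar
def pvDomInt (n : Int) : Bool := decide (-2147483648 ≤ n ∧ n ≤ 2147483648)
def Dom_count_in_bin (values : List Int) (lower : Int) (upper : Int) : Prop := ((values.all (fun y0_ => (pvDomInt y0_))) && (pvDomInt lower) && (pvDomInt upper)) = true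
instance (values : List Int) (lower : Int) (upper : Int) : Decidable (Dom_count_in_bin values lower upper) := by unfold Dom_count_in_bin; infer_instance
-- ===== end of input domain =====

-- B replaces A's per-element three-way branch with sort + two binary searches (alternative decomposition).

-- ===== PORT A =====
-- seq = [0,0,0] held as the triple (seq.1, seq.2.1, seq.2.2); the for-loop is the foldl.
def count_in_bin (values : List Int) (lower : Int) (upper : Int) : List Int :=
  let seq := values.foldl (fun (seq : Int × Int × Int) i =>
    if i ≤ lower then (seq.1 + 1, seq.2.1, seq.2.2)
    else if lower < i ∧ i ≤ upper then (seq.1, seq.2.1 + 1, seq.2.2)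
    else (seq.1, seq.2.1, seq.2.2 + 1)) (0, 0, 0)
  [seq.1, seq.2.1, seq.2.2]

-- ===== PORT B =====
-- Source B's hand-written bisect_right while-loop; s[mid] is always in range (lo < hi ≤ len s in every call), so getD is exact here.
def pvBisect (s : List Int) (x : Int) (lo hi : Nat) : Nat :=
  if lo < hi then
    let mid := (lo + hi) / 2
    if x < s.getD mid 0 then pvBisect s x lo mid
    else pvBisect s x (mid + 1) hi
  else lo
termination_by hi - lo
decreasing_by all_goals omega

def count_in_bin_alt (values : List Int) (lower : Int) (upper : Int) : List Int :=
  let s := PySem.List.sorted values (fun x => x) false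
  let n := s.length
  let c0 := pvBisect s lower 0 n
  let c1 : Int := (pvBisect s upper c0 n : Int) - (c0 : Int)
  [(c0 : Int), c1, (n : Int) - (c0 : Int) - c1]

-- ===== PRECONDITION & SPEC =====
def Spec_count_in_bin (values : List Int) (lower : Int) (upper : Int) (out : List Int) : Prop := out = count_in_bin_alt values lower upper
instance (values : List Int) (lower : Int) (upper : Int) (out : List Int) : Decidable (Spec_count_in_bin values lower upper out) := by unfold Spec_count_in_bin; infer_instance

-- ===== CLAIM (what is proved, stated in full; the proofs are below) =====
def Claim_equal_count_in_bin : Prop := ∀ (values : List Int) (lower : Int) (upper : Int), Dom_count_in_bin values lower upper → Spec_count_in_bin values lower upper (count_in_bin values lower upper)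

-- ===== LEMMAS AND PROOFS =====

-- A's fold counts, per bin, how many elements satisfy that bin's predicate.
lemma countA_fold (lower upper : Int) (values : List Int) (a b c : Int) :
    values.foldl (fun (seq : Int × Int × Int) i =>
      if i ≤ lower then (seq.1 + 1, seq.2.1, seq.2.2)
      else if lower < i ∧ i ≤ upper then (seq.1, seq.2.1 + 1, seq.2.2)
      else (seq.1, seq.2.1, seq.2.2 + 1)) (a, b, c) =
    (a + values.countP (fun i => decide (i ≤ lower)),
     b + values.countP (fun i => decide (lower < i ∧ i ≤ upper)),
     c + values.countP (fun i => decide (¬(i ≤ lower) ∧ ¬(lower < i ∧ i ≤ upper)))) := by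
  induction values generalizing a b c with
  | nil => simp
  | cons v vs ih =>
    by_cases h1 : v ≤ lower
    · have h2 : ¬(lower < v ∧ v ≤ upper) := by omega
      simp [List.foldl_cons, h1, h2, ih]; ring
    · by_cases h2 : lower < v ∧ v ≤ upper
      · simp [List.foldl_cons, h1, h2, ih]; ring
      · have h3 : upper < v := by omega
        have h4 : lower < v := by omega
        have h5 : ¬ v ≤ upper := by omega
        simp [List.foldl_cons, h1, ih, h3, h4, h5]; ring

-- bisect invariant on a sorted list: the result splits [lo,hi) into a ≤x prefix and a >x suffix.
lemma pvBisect_spec (s : List Int) (hs : s.Pairwise (· ≤ ·)) (x : Int) :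
    ∀ lo hi, lo ≤ hi → hi ≤ s.length →
      lo ≤ pvBisect s x lo hi ∧ pvBisect s x lo hi ≤ hi ∧
      (∀ i (h : i < s.length), lo ≤ i → i < pvBisect s x lo hi → s[i] ≤ x) ∧
      (∀ i (h : i < s.length), pvBisect s x lo hi ≤ i → i < hi → x < s[i]) := by
  have hmono : ∀ i j (hi : i < s.length) (hj : j < s.length), i ≤ j → s[i] ≤ s[j] := by
    intro i j hi hj hij
    rcases Nat.lt_or_ge i j with h | h
    · exact (List.pairwise_iff_getElem.mp hs) i j hi hj h
    · have : i = j := by omega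
      subst this; rfl
  intro lo hi
  fun_induction pvBisect s x lo hi with
  | case1 lo hi hlt mid hx ih =>
    intro _ hn
    have hmidlt : mid < s.length := by omega
    have hmid : s.getD mid 0 = s[mid] := List.getD_eq_getElem s 0 hmidlt
    obtain ⟨a1, a2, a3, a4⟩ := ih (by omega) (by omega)
    refine ⟨a1, by omega, a3, ?_⟩
    intro i h hri hihi
    rcases Nat.lt_or_ge i mid with hc | hc
    · exact a4 i h hri hc
    · calc x < s[mid] := by rw [hmid] at hx; exact hx
        _ ≤ s[i] := hmono mid i hmidlt h hc
  | case2 lo hi hlt mid hx ih =>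
    intro _ hn
    have hmidlt : mid < s.length := by omega
    have hmid : s.getD mid 0 = s[mid] := List.getD_eq_getElem s 0 hmidlt
    obtain ⟨a1, a2, a3, a4⟩ := ih (by omega) hn
    refine ⟨by omega, a2, ?_, a4⟩
    intro i h hloi hir
    rcases Nat.lt_or_ge i (mid + 1) with hc | hc
    · calc s[i] ≤ s[mid] := hmono i mid h hmidlt (by omega)
        _ ≤ x := by rw [hmid] at hx; omega
    · exact a3 i h hc hir
  | case3 lo hi hge =>
    intro hle hn
    exact ⟨le_refl _, hle, by omega, by omega⟩

-- if p holds exactly on the index band [a,b), countP p s = b - a.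
lemma countP_band (s : List Int) (p : Int → Bool) (a b : Nat) (hab : a ≤ b) (hbn : b ≤ s.length)
    (h : ∀ i (h : i < s.length), p s[i] = true ↔ (a ≤ i ∧ i < b)) :
    s.countP p = b - a := by
  have hsplit : s = s.take b ++ s.drop b := (List.take_append_drop b s).symm
  have hdrop : (s.drop b).countP p = 0 := by
    rw [List.countP_eq_zero]
    intro y hy
    obtain ⟨j, hj, rfl⟩ := List.mem_iff_getElem.mp hy
    rw [List.getElem_drop]
    have hlen : b + j < s.length := by simp at hj; omega
    intro hp
    have := (h (b + j) hlen).mp hp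
    omega
  have htb : s.take b = (s.take b).take a ++ (s.take b).drop a := (List.take_append_drop a (s.take b)).symm
  have htake_a : (s.take b).take a = s.take a := by rw [List.take_take]; congr 1; omega
  have htakea0 : (s.take a).countP p = 0 := by
    rw [List.countP_eq_zero]
    intro y hy
    obtain ⟨j, hj, rfl⟩ := List.mem_iff_getElem.mp hy
    have hja : j < a := by simp at hj; omega
    rw [List.getElem_take]
    intro hp
    have := (h j (by omega)).mp hp
    omega
  have hmidall : ((s.take b).drop a).countP p = ((s.take b).drop a).length := by
    rw [List.countP_eq_length]
    intro y hy
    obtain ⟨j, hj, rfl⟩ := List.mem_iff_getElem.mp hy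
    have hjl : a + j < b := by simp at hj; omega
    rw [List.getElem_drop, List.getElem_take]
    exact (h (a + j) (by omega)).mpr (by omega)
  have hmidlen : ((s.take b).drop a).length = b - a := by simp; omega
  calc s.countP p = (s.take b ++ s.drop b).countP p := by rw [← hsplit]
    _ = (s.take b).countP p + 0 := by rw [List.countP_append, hdrop]
    _ = ((s.take b).take a ++ (s.take b).drop a).countP p := by rw [← htb]; omega
    _ = 0 + (b - a) := by rw [List.countP_append, htake_a, htakea0, hmidall, hmidlen]
    _ = b - a := by omega

theorem count_in_bin_spec_aux (values : List Int) (lower upper : Int) :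
    count_in_bin values lower upper = count_in_bin_alt values lower upper := by
  have hperm : (PySem.List.sorted values (fun x => x) false).Perm values :=
    PySem.List.sorted_perm values (fun x => x) false
  have hpw : (PySem.List.sorted values (fun x => x) false).Pairwise (· ≤ ·) :=
    PySem.List.sorted_pairwise values (fun x => x)
  set s := PySem.List.sorted values (fun x => x) false with hsdef
  have hlen : s.length = values.length := hperm.length_eq
  obtain ⟨h0lo, h0hi, h0a, h0b⟩ := pvBisect_spec s hpw lower 0 s.length (Nat.zero_le _) (le_refl _)
  set r0 := pvBisect s lower 0 s.length with hr0
  obtain ⟨h1lo, h1hi, h1a, h1b⟩ := pvBisect_spec s hpw upper r0 s.length h0hi (le_refl _)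
  set r1 := pvBisect s upper r0 s.length with hr1
  have hc0 : s.countP (fun i => decide (i ≤ lower)) = r0 - 0 := by
    apply countP_band s _ 0 r0 (Nat.zero_le _) h0hi
    intro i h
    simp only [decide_eq_true_eq]
    constructor
    · intro hp
      refine ⟨Nat.zero_le _, ?_⟩
      by_contra hge
      have := h0b i h (by omega) (by omega)
      omega
    · intro ⟨_, hib⟩; exact h0a i h (Nat.zero_le _) hib
  have hc1 : s.countP (fun i => decide (lower < i ∧ i ≤ upper)) = r1 - r0 := by
    apply countP_band s _ r0 r1 h1lo h1hi
    intro i h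
    simp only [decide_eq_true_eq]
    constructor
    · intro ⟨hp1, hp2⟩
      constructor
      · by_contra hge
        have := h0a i h (Nat.zero_le _) (by omega)
        omega
      · by_contra hge
        have := h1b i h (by omega) (by omega)
        omega
    · intro ⟨hia, hib⟩
      exact ⟨h0b i h hia (by omega), h1a i h hia hib⟩
  have hc2 : s.countP (fun i => decide (¬(i ≤ lower) ∧ ¬(lower < i ∧ i ≤ upper))) = s.length - r1 := by
    apply countP_band s _ r1 s.length h1hi (le_refl _)
    intro i h
    simp only [decide_eq_true_eq]
    constructor
    · intro ⟨hp1, hp2⟩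
      refine ⟨?_, h⟩
      by_contra hge
      rcases Nat.lt_or_ge i r0 with hc | hc
      · exact hp1 (h0a i h (Nat.zero_le _) hc)
      · exact hp2 ⟨h0b i h hc h, h1a i h hc (by omega)⟩
    · intro ⟨hia, _⟩
      have hgt : upper < s[i] := h1b i h hia h
      have hgl : lower < s[i] := h0b i h (by omega) h
      exact ⟨by omega, by omega⟩
  have e0 : values.countP (fun i => decide (i ≤ lower)) = r0 - 0 := by
    rw [← hperm.countP_eq]; exact hc0
  have e1 : values.countP (fun i => decide (lower < i ∧ i ≤ upper)) = r1 - r0 := by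
    rw [← hperm.countP_eq]; exact hc1
  have e2 : values.countP (fun i => decide (¬(i ≤ lower) ∧ ¬(lower < i ∧ i ≤ upper))) = s.length - r1 := by
    rw [← hperm.countP_eq]; exact hc2
  rw [count_in_bin, count_in_bin_alt]
  simp only [countA_fold, zero_add, e0, e1, e2, ← hsdef, ← hr0, ← hr1]
  simp only [List.cons.injEq, and_true]
  omega

-- ===== VERDICT (by name: the statement is the Claim_ definition above) =====
theorem count_in_bin_spec : Claim_equal_count_in_bin := by
  intro values lower upper _
  exact count_in_bin_spec_aux values lower upper
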